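-- pv_equiv track=rewrite | github.com/papn4372-cmyk/jcodemunch-mcp | src/jcodemunch_mcp/tools/render_diagram.py | _disambiguate_basenames
-- ===== SOURCE A (Python) =====
-- from collections import defaultdict
--
-- def _basename(path: str) -> str:
--     """Strip to filename only, forward-slash normalised."""
--     return path.replace("\\", "/").rsplit("/", 1)[-1]
--
-- def _disambiguate_basenames(paths: list[str]) -> dict[str, str]:
--     """Map each path to a short display name, disambiguating collisions."""
--     base_map: dict[str, list[str]] = defaultdict(list)
--     for p in paths:
--         base_map[_basename(p)].append(p)
--
--     display: dict[str, str] = {}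
--     for base, sources in base_map.items():
--         if len(sources) == 1:
--             display[sources[0]] = base
--         else:
--             for s in sources:
--                 parts = s.replace("\\", "/").split("/")
--                 suffix = "/".join(parts[-2:]) if len(parts) >= 2 else base
--                 display[s] = suffix
--     return display
-- ===== SOURCE B (Python) =====
-- def _basename(path: str) -> str:
--     """Strip to filename only, forward-slash normalised."""
--     return path.replace("\\", "/").rsplit("/", 1)[-1]
--
-- def _disambiguate_basenames(paths: list[str]) -> dict[str, str]:
--     """Map each path to a short display name, disambiguating collisions."""
--     counts: dict[str, int] = {}
--     first: dict[str, str] = {}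
--     for p in paths:
--         b = _basename(p)
--         counts[b] = counts.get(b, 0) + 1
--         first.setdefault(b, p)
--
--     display: dict[str, str] = {}
--     for b, c in counts.items():
--         if c == 1:
--             display[first[b]] = b
--         else:
--             for p in paths:
--                 if _basename(p) == b:
--                     parts = p.replace("\\", "/").split("/")
--                     display[p] = "/".join(parts[-2:]) if len(parts) >= 2 else b
--     return display
-- ===== Notes on version B (the rewrite author's own statement) =====
-- stated objective: alternative
-- what changed: B replaces A's group-into-lists-of-sources-then-iterate-groups structure by a single counting pass (basename -> count, basename -> first path) followed by a loop over the counts that emits unique basenames directly and rescans the path list only for colliding basenames; no per-basename source lists are ever built.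
import Mathlib
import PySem

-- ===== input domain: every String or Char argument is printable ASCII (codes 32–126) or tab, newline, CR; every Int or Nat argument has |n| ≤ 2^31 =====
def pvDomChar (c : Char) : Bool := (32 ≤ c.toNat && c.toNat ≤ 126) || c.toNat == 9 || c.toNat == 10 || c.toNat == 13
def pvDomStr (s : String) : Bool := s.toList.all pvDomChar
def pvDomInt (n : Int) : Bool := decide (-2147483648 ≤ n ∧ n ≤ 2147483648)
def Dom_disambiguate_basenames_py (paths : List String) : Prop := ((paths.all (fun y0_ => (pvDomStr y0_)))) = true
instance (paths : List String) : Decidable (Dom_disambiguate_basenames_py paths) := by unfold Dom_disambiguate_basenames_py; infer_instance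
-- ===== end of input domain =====

-- B replaces A's group-into-source-lists-then-iterate-groups structure by one counting pass
-- (basename -> count, basename -> first path) followed by a loop over the counts that rescans
-- the path list only for colliding basenames; same return value (objective: alternative).

-- ===== PORT A =====
-- _basename: path.replace("\\", "/").rsplit("/", 1)[-1].  PySem has no rsplit; ported by hand:
-- for the one-character separator "/", rsplit("/", 1)[-1] is exactly the characters after the
-- last '/' (the whole string if there is no '/'), accumulated here by a left fold that resets at '/'.
def pvBasename (p : String) : String :=
  String.ofList (((PySem.Str.replace p "\\" "/").toList).foldl
    (fun acc c => if c = '/' then [] else acc ++ [c]) [])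

-- the collision-branch body, textually identical in both Pythons:
-- parts = s.replace("\\", "/").split("/"); "/".join(parts[-2:]) if len(parts) >= 2 else base
def pvSuffix (s base : String) : String :=
  let parts := PySem.Chars.splitOn (PySem.Str.replace s "\\" "/").toList "/".toList
  if 2 ≤ parts.length then String.ofList (PySem.Chars.join "/".toList (PySem.List.slice parts (some (-2)) none))
  else base

def disambiguate_basenames_py (paths : List String) : List (String × String) :=
  let base_map : PySem.Dict String (List String) :=
    paths.foldl (fun d p => d.modify (pvBasename p) [] (fun x => x ++ [p])) PySem.Dict.empty
  let display : PySem.Dict String String :=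
    base_map.items.foldl (fun disp bs =>
      if bs.2.length == 1 then
        -- sources[0]: the list has length 1 here, so Python's indexing cannot raise; pyGetD with a dummy default is exact
        disp.insert (PySem.List.pyGetD bs.2 0 "") bs.1
      else
        bs.2.foldl (fun disp s => disp.insert s (pvSuffix s bs.1)) disp) PySem.Dict.empty
  display.items

-- ===== PORT B =====
def disambiguate_basenames_py_alt (paths : List String) : List (String × String) :=
  let cf := paths.foldl (fun cf p =>
      let b := pvBasename p
      (cf.1.insert b (cf.1.getD b 0 + 1), cf.2.setdefault b p))
    ((PySem.Dict.empty : PySem.Dict String Int), (PySem.Dict.empty : PySem.Dict String String))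
  let display : PySem.Dict String String :=
    cf.1.items.foldl (fun disp bc =>
      if bc.2 == 1 then
        -- first[b]: b is a key of counts, hence of first (filled in the same loop), so Python's lookup cannot raise; getD with a dummy default is exact
        disp.insert (cf.2.getD bc.1 "") bc.1
      else
        paths.foldl (fun disp p =>
          if pvBasename p == bc.1 then disp.insert p (pvSuffix p bc.1) else disp) disp)
      PySem.Dict.empty
  display.items

-- ===== PRECONDITION & SPEC =====
def Spec_disambiguate_basenames_py (paths : List String) (out : List (String × String)) : Prop := out = disambiguate_basenames_py_alt paths
instance (paths : List String) (out : List (String × String)) : Decidable (Spec_disambiguate_basenames_py paths out) := by unfold Spec_disambiguate_basenames_py; infer_instance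

-- ===== CLAIM (what is proved, stated in full; the proofs are below) =====
def Claim_equal_disambiguate_basenames_py : Prop := ∀ (paths : List String), Dom_disambiguate_basenames_py paths → Spec_disambiguate_basenames_py paths (disambiguate_basenames_py paths)

-- ===== LEMMAS AND PROOFS =====

-- the per-distinct-basename step that BOTH displays reduce to
def pvStep (paths : List String) (disp : PySem.Dict String String) (b : String) : PySem.Dict String String :=
  let srcs := paths.filter (fun p => pvBasename p == b)
  if srcs.length == 1 then disp.insert (PySem.List.pyGetD srcs 0 "") b
  else srcs.foldl (fun disp s => disp.insert s (pvSuffix s b)) disp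

-- a fold whose state is a pair of independently-updated components splits into two folds
theorem pv_foldl_pair {α β γ : Type} (l : List α) (f : β → α → β) (g : γ → α → γ) (b : β) (c : γ) :
    l.foldl (fun bc x => (f bc.1 x, g bc.2 x)) (b, c) = (l.foldl f b, l.foldl g c) := by
  induction l generalizing b c with
  | nil => rfl
  | cons x l ih => simpa using ih (f b x) (g c x)

-- the setdefault loop remembers the FIRST path with each basename
theorem pv_first_get? (l : List String) (d : PySem.Dict String String) (b : String) :
    (l.foldl (fun d p => d.setdefault (pvBasename p) p) d).get? b
      = ((d.get? b).or (l.find? (fun p => pvBasename p == b))) := by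
  induction l generalizing d with
  | nil => simp
  | cons p l ih =>
    simp only [List.foldl_cons, List.find?_cons]
    rw [ih]
    by_cases hb : b = pvBasename p
    · rw [hb, PySem.Dict.get?_setdefault_self]
      cases h : d.get? (pvBasename p) <;> simp
    · rw [PySem.Dict.get?_setdefault_of_ne _ _ hb]
      have hf : (pvBasename p == b) = false := by simp [Ne.symm hb]
      simp [hf]

-- A: the defaultdict grouping visits the distinct basenames in first-occurrence order,
-- each with its in-order source list paths.filter (basename = b)
theorem pvA_eq (paths : List String) :
    disambiguate_basenames_py paths
      = ((PySem.List.dedup (paths.map pvBasename)).foldl (pvStep paths) PySem.Dict.empty).items := by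
  show ((paths.foldl (fun d p => d.modify (pvBasename p) [] (fun x => x ++ [p])) PySem.Dict.empty).items.foldl
        (fun disp bs =>
          if bs.2.length == 1 then disp.insert (PySem.List.pyGetD bs.2 0 "") bs.1
          else bs.2.foldl (fun disp s => disp.insert s (pvSuffix s bs.1)) disp) PySem.Dict.empty).items = _
  have hfold : paths.foldl (fun d p => d.modify (pvBasename p) [] (fun x => x ++ [p])) PySem.Dict.empty
      = (paths.map (fun p => ((pvBasename p, p) : String × String))).foldl
          (fun d q => d.modify q.1 [] (fun x => x ++ [q.2])) PySem.Dict.empty := by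
    rw [List.foldl_map]
  have hkeys : (paths.foldl (fun d p => d.modify (pvBasename p) [] (fun x => x ++ [p])) PySem.Dict.empty).keys
      = PySem.List.dedup (paths.map pvBasename) := by
    rw [PySem.Dict.keys_foldl_modify_key paths pvBasename ([] : List String)
          (fun _ p => fun x => x ++ [p]) PySem.Dict.empty]
    simp [PySem.Set.update, PySem.Set.ofList, PySem.Set.empty]
  have hnodup : (paths.foldl (fun d p => d.modify (pvBasename p) [] (fun x => x ++ [p])) PySem.Dict.empty).keys.Nodup := by
    rw [hkeys]; exact PySem.List.nodup_dedup _
  have hgetD : ∀ b, (paths.foldl (fun d p => d.modify (pvBasename p) [] (fun x => x ++ [p])) PySem.Dict.empty).getD b []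
      = paths.filter (fun p => pvBasename p == b) := by
    intro b
    rw [hfold, PySem.Dict.getD_foldl_modify_append]
    simp [List.filter_map, Function.comp_def]
  rw [PySem.Dict.items_eq_map_keys _ hnodup ([] : List String), hkeys]
  rw [List.map_congr_left (fun b _ => by rw [hgetD b] :
        ∀ b ∈ PySem.List.dedup (paths.map pvBasename),
          ((b, (paths.foldl (fun d p => d.modify (pvBasename p) [] (fun x => x ++ [p])) PySem.Dict.empty).getD b []) : String × List String)
            = (b, paths.filter (fun p => pvBasename p == b)))]
  rw [List.foldl_map]
  rfl

-- B: the counter visits the same distinct basenames in the same order; per basename the two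
-- branches compute the same insertions (count = |filter|, first = head of filter, guarded rescan = filter)
theorem pvB_eq (paths : List String) :
    disambiguate_basenames_py_alt paths
      = ((PySem.List.dedup (paths.map pvBasename)).foldl (pvStep paths) PySem.Dict.empty).items := by
  have hpair := pv_foldl_pair paths
      (fun d p => d.insert (pvBasename p) (d.getD (pvBasename p) 0 + 1))
      (fun d p => d.setdefault (pvBasename p) p)
      (PySem.Dict.empty : PySem.Dict String Int) (PySem.Dict.empty : PySem.Dict String String)
  show ((paths.foldl (fun cf p =>
        ((cf.1.insert (pvBasename p) (cf.1.getD (pvBasename p) 0 + 1) : PySem.Dict String Int),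
         (cf.2.setdefault (pvBasename p) p : PySem.Dict String String)))
      (PySem.Dict.empty, PySem.Dict.empty)).1.items.foldl _ PySem.Dict.empty).items = _
  rw [hpair]
  have hcounts : paths.foldl (fun d p => d.insert (pvBasename p) (d.getD (pvBasename p) 0 + 1))
      (PySem.Dict.empty : PySem.Dict String Int) = PySem.Dict.counter (paths.map pvBasename) := by
    rw [← PySem.Dict.foldl_insert_getD_add_one_eq_counter, List.foldl_map]
  rw [hcounts, PySem.Dict.items_counter, List.foldl_map]
  rw [← PySem.List.dedup_eq_ofList]
  apply congrArg
  apply PySem.List.foldl_congr_mem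
  intro disp b hb
  have hcount : List.count b (paths.map pvBasename)
      = (paths.filter (fun p => pvBasename p == b)).length := by
    rw [List.count_eq_countP, List.countP_map, ← List.countP_eq_length_filter]
    rfl
  have hfind : paths.find? (fun p => pvBasename p == b)
      = (paths.filter (fun p => pvBasename p == b)).head? := List.head?_filter.symm
  unfold pvStep
  by_cases h1 : (paths.filter (fun p => pvBasename p == b)).length = 1
  · have hc : ((List.count b (paths.map pvBasename) : Int) == 1) = true := by
      simp [hcount, h1]
    simp only [hc, if_pos, h1]
    have hfirst : (paths.foldl (fun d p => d.setdefault (pvBasename p) p)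
        (PySem.Dict.empty : PySem.Dict String String)).getD b ""
        = PySem.List.pyGetD (paths.filter (fun p => pvBasename p == b)) 0 "" := by
      rw [PySem.Dict.getD_eq_get?_getD, pv_first_get?, PySem.Dict.get?_empty, Option.none_or, hfind]
      cases hf : (paths.filter (fun p => pvBasename p == b)) with
      | nil => simp [hf] at h1
      | cons s t =>
        have ht : t.length = 0 := by rw [hf] at h1; simpa using h1
        rw [List.eq_nil_of_length_eq_zero ht]
        simp [PySem.List.pyGetD]
    simp [hfirst]
  · have hc : ((List.count b (paths.map pvBasename) : Int) == 1) = false := by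
      simp [hcount]; omega
    have hl : ((paths.filter (fun p => pvBasename p == b)).length == 1) = false := by
      simp [h1]
    simp only [hc, hl, if_neg, Bool.false_eq_true, not_false_iff]
    rw [List.foldl_filter]

-- ===== VERDICT (by name: the statement is the Claim_ definition above) =====
theorem disambiguate_basenames_py_spec : Claim_equal_disambiguate_basenames_py := by
  intro paths _
  unfold Spec_disambiguate_basenames_py
  rw [pvA_eq, pvB_eq]
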